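-- pv_equiv track=rewrite | github.com/Minerstove/Python | cs11/Lab4/lab4f.py | classify_by_standing
-- ===== SOURCE A (Python) =====
-- def classify_by_standing(y, students):
--     standing = {
--     "freshman": set(),
--     "sophomore": set(),
--     "junior": set(),
--     "senior": set(),
--     "immortal": set(),
--     }
--
--     for name, id in students:
--         if int(id[:4]) == y:
--             standing["freshman"].add(name)
--         elif int(id[:4]) == y - 1:
--             standing["sophomore"].add(name)
--         elif int(id[:4]) == y - 2:
--             standing["junior"].add(name)
--         elif int(id[:4]) == y - 3:
--             standing["senior"].add(name)
--         else:
--             standing["immortal"].add(name)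
--
--     return standing
-- ===== SOURCE B (Python) =====
-- def classify_by_standing(y, students):
--     diffs = [(name, y - int(id[:4])) for name, id in students]
--     standing = {label: {name for name, d in diffs if d == off}
--                 for off, label in enumerate(("freshman", "sophomore", "junior", "senior"))}
--     standing["immortal"] = {name for name, d in diffs if d < 0 or d > 3}
--     return standing
-- ===== Notes on version B (the rewrite author's own statement) =====
-- stated objective: simpler
-- what changed: B replaces A's per-student if/elif chain that mutates a dict of sets with a single parse pass producing (name, y - int(id[:4])) pairs, then builds each bucket bucket-major by one comprehension per standing (offset 0..3, else immortal).
-- outside the precondition, e.g. on classify_by_standing(2024, [('bob', 'abcd')]): A raises ValueError, B raises ValueError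
import Mathlib
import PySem

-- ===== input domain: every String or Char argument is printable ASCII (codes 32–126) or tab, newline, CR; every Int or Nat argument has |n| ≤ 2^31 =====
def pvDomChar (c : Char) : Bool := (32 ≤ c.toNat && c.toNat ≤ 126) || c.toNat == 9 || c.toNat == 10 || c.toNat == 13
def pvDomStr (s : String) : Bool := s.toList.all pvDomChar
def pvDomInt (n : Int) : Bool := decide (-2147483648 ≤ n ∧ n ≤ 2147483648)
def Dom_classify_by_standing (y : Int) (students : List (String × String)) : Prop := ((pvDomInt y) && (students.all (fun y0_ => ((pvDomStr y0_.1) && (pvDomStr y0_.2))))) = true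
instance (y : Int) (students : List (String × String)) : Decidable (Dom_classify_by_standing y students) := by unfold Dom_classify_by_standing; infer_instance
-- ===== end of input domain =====

-- B replaces A's per-student if/elif chain by one parse pass producing (name, offset) pairs
-- and then builds each bucket's set by a single bucket-major filter (objective: simpler).

-- ===== PORT A =====
-- A's loop body; the match makes the int() call total: `none` (ValueError in Python) is excluded by Pre_.
def pvStepA (y : Int) (d : PySem.Dict String (PySem.Set String)) (p : String × String) :
    PySem.Dict String (PySem.Set String) :=
  match PySem.Int.ofStr? (PySem.Str.slice p.2 none (some 4)) with
  | none => d
  | some v =>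
    if v = y then d.modify "freshman" PySem.Set.empty (fun s => PySem.Set.add s p.1)
    else if v = y - 1 then d.modify "sophomore" PySem.Set.empty (fun s => PySem.Set.add s p.1)
    else if v = y - 2 then d.modify "junior" PySem.Set.empty (fun s => PySem.Set.add s p.1)
    else if v = y - 3 then d.modify "senior" PySem.Set.empty (fun s => PySem.Set.add s p.1)
    else d.modify "immortal" PySem.Set.empty (fun s => PySem.Set.add s p.1)

def classify_by_standing (y : Int) (students : List (String × String)) : List (String × List String) :=
  let standing : PySem.Dict String (PySem.Set String) :=
    PySem.Dict.ofList [("freshman", PySem.Set.empty), ("sophomore", PySem.Set.empty),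
      ("junior", PySem.Set.empty), ("senior", PySem.Set.empty), ("immortal", PySem.Set.empty)]
  (students.foldl (pvStepA y) standing).items

-- ===== PORT B =====
-- diffs = [(name, y - int(id[:4])) ...]; the `none` case (ValueError in Python) is excluded by Pre_.
def pvDiffs (y : Int) (students : List (String × String)) : List (String × Int) :=
  students.map (fun p =>
    (p.1, match PySem.Int.ofStr? (PySem.Str.slice p.2 none (some 4)) with
          | none => 0
          | some v => y - v))

def classify_by_standing_alt (y : Int) (students : List (String × String)) : List (String × List String) :=
  let diffs := pvDiffs y students
  [("freshman", PySem.Set.ofList ((diffs.filter (fun q => q.2 = 0)).map (·.1))),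
   ("sophomore", PySem.Set.ofList ((diffs.filter (fun q => q.2 = 1)).map (·.1))),
   ("junior", PySem.Set.ofList ((diffs.filter (fun q => q.2 = 2)).map (·.1))),
   ("senior", PySem.Set.ofList ((diffs.filter (fun q => q.2 = 3)).map (·.1))),
   ("immortal", PySem.Set.ofList ((diffs.filter (fun q => decide (q.2 < 0) || decide (3 < q.2))).map (·.1)))]

-- ===== PRECONDITION & SPEC =====
-- Pre_ excludes exactly the students whose id[:4] is not an int literal: Python's int() raises ValueError there.
def Pre_classify_by_standing (y : Int) (students : List (String × String)) : Prop :=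
  students.all (fun p => (PySem.Int.ofStr? (PySem.Str.slice p.2 none (some 4))).isSome) = true
instance (y : Int) (students : List (String × String)) : Decidable (Pre_classify_by_standing y students) := by
  unfold Pre_classify_by_standing; infer_instance

def pvWitness_classify_by_standing : Int × (List (String × String)) :=
  (2024, [("alice", "2023A1"), ("bob", "2020"), ("carol", "1999Z"), ("alice", "2023B")])

def Spec_classify_by_standing (y : Int) (students : List (String × String)) (out : List (String × List String)) : Prop := out = classify_by_standing_alt y students
instance (y : Int) (students : List (String × String)) (out : List (String × List String)) : Decidable (Spec_classify_by_standing y students out) := by unfold Spec_classify_by_standing; infer_instance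

-- ===== CLAIM (what is proved, stated in full; the proofs are below) =====
def Claim_equal_classify_by_standing : Prop := ∀ (y : Int) (students : List (String × String)), Dom_classify_by_standing y students → Pre_classify_by_standing y students → Spec_classify_by_standing y students (classify_by_standing y students)

-- ===== LEMMAS AND PROOFS =====

-- The invariant: A's dict-fold over students, started on the five-key dict with arbitrary set
-- contents, yields exactly B's five bucket lists, each appended via Set.add folds.
theorem pv_invariant (y : Int) (students : List (String × String))
    (h : ∀ p ∈ students, (PySem.Int.ofStr? (PySem.Str.slice p.2 none (some 4))).isSome)
    (s0 s1 s2 s3 s4 : PySem.Set String) :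
    (students.foldl (pvStepA y)
      (PySem.Dict.ofList [("freshman", s0), ("sophomore", s1),
        ("junior", s2), ("senior", s3), ("immortal", s4)])).items =
    [("freshman", ((pvDiffs y students).filter (fun q => q.2 = 0)).map (·.1) |>.foldl PySem.Set.add s0),
     ("sophomore", ((pvDiffs y students).filter (fun q => q.2 = 1)).map (·.1) |>.foldl PySem.Set.add s1),
     ("junior", ((pvDiffs y students).filter (fun q => q.2 = 2)).map (·.1) |>.foldl PySem.Set.add s2),
     ("senior", ((pvDiffs y students).filter (fun q => q.2 = 3)).map (·.1) |>.foldl PySem.Set.add s3),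
     ("immortal", ((pvDiffs y students).filter (fun q => decide (q.2 < 0) || decide (3 < q.2))).map (·.1) |>.foldl PySem.Set.add s4)] := by
  induction students generalizing s0 s1 s2 s3 s4 with
  | nil => rfl
  | cons hd tl ih =>
    have hhd := h hd (List.mem_cons_self ..)
    have htl : ∀ p ∈ tl, (PySem.Int.ofStr? (PySem.Str.slice p.2 none (some 4))).isSome :=
      fun p hp => h p (List.mem_cons_of_mem _ hp)
    obtain ⟨v, hv⟩ := Option.isSome_iff_exists.mp hhd
    simp only [List.foldl_cons, pvStepA, hv]
    by_cases h0 : v = y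
    · rw [if_pos h0]
      show (List.foldl (pvStepA y) (PySem.Dict.ofList [("freshman", PySem.Set.add s0 hd.1),
        ("sophomore", s1), ("junior", s2), ("senior", s3), ("immortal", s4)]) tl).items = _
      rw [ih htl]
      simp [pvDiffs, hv, h0]
    · rw [if_neg h0]
      by_cases h1 : v = y - 1
      · rw [if_pos h1]
        show (List.foldl (pvStepA y) (PySem.Dict.ofList [("freshman", s0),
          ("sophomore", PySem.Set.add s1 hd.1), ("junior", s2), ("senior", s3), ("immortal", s4)]) tl).items = _
        rw [ih htl]
        have e1 : y - v = 1 := by omega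
        have e0 : ¬ (y - v = 0) := by omega
        simp [pvDiffs, hv, e1]
      · rw [if_neg h1]
        by_cases h2 : v = y - 2
        · rw [if_pos h2]
          show (List.foldl (pvStepA y) (PySem.Dict.ofList [("freshman", s0), ("sophomore", s1),
            ("junior", PySem.Set.add s2 hd.1), ("senior", s3), ("immortal", s4)]) tl).items = _
          rw [ih htl]
          have e2 : y - v = 2 := by omega
          have e0 : ¬ (y - v = 0) := by omega
          have e1 : ¬ (y - v = 1) := by omega
          simp [pvDiffs, hv, e2]
        · rw [if_neg h2]
          by_cases h3 : v = y - 3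
          · rw [if_pos h3]
            show (List.foldl (pvStepA y) (PySem.Dict.ofList [("freshman", s0), ("sophomore", s1),
              ("junior", s2), ("senior", PySem.Set.add s3 hd.1), ("immortal", s4)]) tl).items = _
            rw [ih htl]
            have e3 : y - v = 3 := by omega
            have e0 : ¬ (y - v = 0) := by omega
            have e1 : ¬ (y - v = 1) := by omega
            have e2 : ¬ (y - v = 2) := by omega
            simp [pvDiffs, hv, e3]
          · rw [if_neg h3]
            show (List.foldl (pvStepA y) (PySem.Dict.ofList [("freshman", s0), ("sophomore", s1),
              ("junior", s2), ("senior", s3), ("immortal", PySem.Set.add s4 hd.1)]) tl).items = _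
            rw [ih htl]
            have e0 : ¬ (y - v = 0) := by omega
            have e1 : ¬ (y - v = 1) := by omega
            have e2 : ¬ (y - v = 2) := by omega
            have e3 : ¬ (y - v = 3) := by omega
            rcases (by omega : y - v < 0 ∨ 3 < y - v) with hlt | hlt <;>
              simp [pvDiffs, hv, e0, e1, e2, e3, hlt]

-- ===== VERDICT (by name: the statement is the Claim_ definition above) =====
theorem classify_by_standing_spec : Claim_equal_classify_by_standing := by
  intro y students _ hpre
  have h : ∀ p ∈ students, (PySem.Int.ofStr? (PySem.Str.slice p.2 none (some 4))).isSome := by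
    intro p hp
    simpa using List.all_eq_true.mp hpre p hp
  show classify_by_standing y students = classify_by_standing_alt y students
  simp only [classify_by_standing, classify_by_standing_alt, pv_invariant y students h,
    PySem.Set.ofList_eq_foldl, PySem.Set.empty]
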